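-- pv_equiv track=rewrite | github.com/bennygiardina/test_2 | update_indian_wells_matches_csv.py | extract_draw_block_lines
-- ===== SOURCE A (Python) =====
-- def clean_lines(text: str) -> list[str]:
--     return [line.strip() for line in text.splitlines() if line and line.strip()]
--
-- def extract_draw_block_lines(page_text: str) -> list[str]:
--     lines = clean_lines(page_text)
--
--     start_idx = None
--     end_idx = None
--
--     for i, line in enumerate(lines):
--         if "Main Draw Singles" in line:
--             start_idx = i + 1
--             break
--
--     if start_idx is None:
--         return []
--
--     for i in range(start_idx, len(lines)):
--         if line_starts_round_header(lines[i]):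
--             end_idx = i
--             break
--
--     if end_idx is None:
--         end_idx = len(lines)
--
--     return lines[start_idx:end_idx]
--
-- def line_starts_round_header(line: str) -> bool:
--     return line.strip().startswith("Round of 128")
-- ===== SOURCE B (Python) =====
-- def clean_lines(text: str) -> list[str]:
--     return [line.strip() for line in text.splitlines() if line and line.strip()]
--
-- def line_starts_round_header(line: str) -> bool:
--     return line.strip().startswith("Round of 128")
--
-- def extract_draw_block_lines(page_text: str) -> list[str]:
--     started = False
--     result = []
--     for line in clean_lines(page_text):
--         if not started:
--             if "Main Draw Singles" in line:
--                 started = True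
--         else:
--             if line_starts_round_header(line):
--                 break
--             result.append(line)
--     return result
-- ===== Notes on version B (the rewrite author's own statement) =====
-- stated objective: simpler
-- what changed: replaces the two index-based scans (find start_idx, then find end_idx, then slice) with one pass over the cleaned lines using a started flag that accumulates the block lines directly
import Mathlib
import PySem

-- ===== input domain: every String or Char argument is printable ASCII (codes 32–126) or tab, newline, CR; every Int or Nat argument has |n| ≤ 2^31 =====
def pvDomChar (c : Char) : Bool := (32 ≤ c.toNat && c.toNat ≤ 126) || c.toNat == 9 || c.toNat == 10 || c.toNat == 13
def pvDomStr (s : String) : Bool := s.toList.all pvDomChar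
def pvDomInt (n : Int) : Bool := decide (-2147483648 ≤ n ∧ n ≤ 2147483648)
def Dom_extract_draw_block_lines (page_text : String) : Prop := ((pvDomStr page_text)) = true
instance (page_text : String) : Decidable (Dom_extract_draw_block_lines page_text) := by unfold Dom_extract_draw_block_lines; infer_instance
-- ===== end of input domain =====

-- B changes only the decomposition: one state-flag pass instead of two index scans plus a slice; no speed claim.

-- ===== PORT A =====
-- shared module helpers (identical source in A and B)
def pv_clean_lines (text : String) : List String :=
  ((PySem.Str.splitlines text).filter
    (fun line => line ≠ "" && PySem.Str.strip line ≠ "")).map PySem.Str.strip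

def pv_line_starts_round_header (line : String) : Bool :=
  PySem.Str.startswith (PySem.Str.strip line) "Round of 128"

-- first enumerate loop: returns start_idx (= i+1 at the first line containing the marker)
def pv_findStartA : List String → Nat → Option Nat
  | [], _ => none
  | l :: ls, i => if PySem.Str.isIn "Main Draw Singles" l then some (i + 1) else pv_findStartA ls (i + 1)

-- second loop: for i in range(start, len(lines)) with break, giving end_idx (len if no header)
def pv_findEndA (lines : List String) (i : Nat) : Nat :=
  if h : i < lines.length then
    if pv_line_starts_round_header lines[i] then i else pv_findEndA lines (i + 1)
  else lines.length
termination_by lines.length - i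

def extract_draw_block_lines (page_text : String) : List String :=
  let lines := pv_clean_lines page_text
  match pv_findStartA lines 0 with
  | none => []
  | some start_idx =>
      let end_idx := pv_findEndA lines start_idx
      PySem.List.slice lines (some (start_idx : Int)) (some (end_idx : Int))

-- ===== PORT B =====
def pv_bLoop : List String → Bool → List String → List String
  | [], _, result => result
  | l :: ls, started, result =>
      if !started then
        if PySem.Str.isIn "Main Draw Singles" l then pv_bLoop ls true result
        else pv_bLoop ls started result
      else
        if pv_line_starts_round_header l then result
        else pv_bLoop ls started (result ++ [l])

def extract_draw_block_lines_alt (page_text : String) : List String :=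
  pv_bLoop (pv_clean_lines page_text) false []

-- ===== PRECONDITION & SPEC =====
def Spec_extract_draw_block_lines (page_text : String) (out : List String) : Prop := out = extract_draw_block_lines_alt page_text
instance (page_text : String) (out : List String) : Decidable (Spec_extract_draw_block_lines page_text out) := by unfold Spec_extract_draw_block_lines; infer_instance

-- ===== CLAIM (what is proved, stated in full; the proofs are below) =====
def Claim_equal_extract_draw_block_lines : Prop := ∀ (page_text : String), Dom_extract_draw_block_lines page_text → Spec_extract_draw_block_lines page_text (extract_draw_block_lines page_text)

-- ===== LEMMAS AND PROOFS =====

theorem pv_findStartA_bounds (ls : List String) (i s : Nat)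
    (h : pv_findStartA ls i = some s) : i < s ∧ s ≤ i + ls.length := by
  induction ls generalizing i with
  | nil => simp [pv_findStartA] at h
  | cons l ls ih =>
      simp only [pv_findStartA] at h
      split at h
      · simp only [Option.some.injEq] at h
        simp only [List.length_cons]; omega
      · have := ih (i + 1) h
        simp only [List.length_cons]; omega

theorem pv_findStartA_shift (ls : List String) (i : Nat) :
    pv_findStartA ls (i + 1) = (pv_findStartA ls i).map (· + 1) := by
  induction ls generalizing i with
  | nil => simp [pv_findStartA]
  | cons l ls ih =>
      simp only [pv_findStartA]
      split
      · rfl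
      · exact ih (i + 1)

theorem pv_findEndA_bounds (lines : List String) (i : Nat) (hi : i ≤ lines.length) :
    i ≤ pv_findEndA lines i ∧ pv_findEndA lines i ≤ lines.length := by
  unfold pv_findEndA
  split
  · split
    · omega
    · have := pv_findEndA_bounds lines (i + 1) (by omega)
      omega
  · omega
termination_by lines.length - i

theorem pv_endA_takeWhile (lines : List String) (i : Nat) (hi : i ≤ lines.length) :
    (lines.drop i).take (pv_findEndA lines i - i)
      = (lines.drop i).takeWhile (fun x => !pv_line_starts_round_header x) := by
  unfold pv_findEndA
  split
  · next h =>
    have hd : lines.drop i = lines[i] :: lines.drop (i + 1) := List.drop_eq_getElem_cons h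
    split
    · next hh =>
      rw [hd, Nat.sub_self, List.take_zero, List.takeWhile_cons, hh]
      simp
    · next hh =>
      have hh' : pv_line_starts_round_header lines[i] = false := by simpa using hh
      have hb := pv_findEndA_bounds lines (i + 1) (by omega)
      have ih := pv_endA_takeWhile lines (i + 1) (by omega)
      rw [hd, List.takeWhile_cons, hh']
      simp only [Bool.not_false, if_pos]
      have hn : pv_findEndA lines (i + 1) - i = (pv_findEndA lines (i + 1) - (i + 1)) + 1 := by omega
      rw [hn, List.take_succ_cons, ih]
  · next h =>
    have : lines.drop i = [] := List.drop_eq_nil_of_le (by omega)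
    simp [this]
termination_by lines.length - i

-- the common characterisation both ports are reduced to
def pv_specFun : List String → List String
  | [] => []
  | l :: ls =>
      if PySem.Str.isIn "Main Draw Singles" l then
        ls.takeWhile (fun x => !pv_line_starts_round_header x)
      else pv_specFun ls

theorem pv_bLoop_started (ls : List String) (acc : List String) :
    pv_bLoop ls true acc = acc ++ ls.takeWhile (fun x => !pv_line_starts_round_header x) := by
  induction ls generalizing acc with
  | nil => simp [pv_bLoop]
  | cons l ls ih =>
      simp only [pv_bLoop, Bool.not_true, List.takeWhile_cons]
      by_cases h : pv_line_starts_round_header l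
      · simp [h]
      · simp [h, ih, List.append_assoc]

theorem pv_B_eq_spec (ls : List String) : pv_bLoop ls false [] = pv_specFun ls := by
  induction ls with
  | nil => rfl
  | cons l ls ih =>
      by_cases hin : PySem.Str.isIn "Main Draw Singles" l
      · simp only [pv_bLoop, pv_specFun, Bool.not_false, if_pos hin]
        simpa using pv_bLoop_started ls []
      · simp only [pv_bLoop, pv_specFun, Bool.not_false, if_neg hin]
        exact ih

theorem pv_A_eq_spec (ls : List String) :
    (match pv_findStartA ls 0 with
      | none => []
      | some s => PySem.List.slice ls (some (s : Int)) (some ((pv_findEndA ls s : Nat) : Int)))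
      = pv_specFun ls := by
  induction ls with
  | nil => rfl
  | cons l ls ih =>
      by_cases hin : PySem.Str.isIn "Main Draw Singles" l
      · have hfs : pv_findStartA (l :: ls) 0 = some 1 := by
          simp only [pv_findStartA, if_pos hin]
        rw [hfs]
        simp only [pv_specFun, if_pos hin]
        rw [PySem.List.slice_natCast]
        have h1 : (1 : Nat) ≤ (l :: ls).length := by simp
        have h2 := pv_endA_takeWhile (l :: ls) 1 h1
        simpa using h2
      · have hfs : pv_findStartA (l :: ls) 0 = pv_findStartA ls 1 := by
          simp only [pv_findStartA, if_neg hin]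
        rw [hfs, pv_findStartA_shift ls 0]
        simp only [pv_specFun, if_neg hin]
        cases hs : pv_findStartA ls 0 with
        | none =>
            rw [hs] at ih
            simpa using ih
        | some s =>
            rw [hs] at ih
            have ih' : PySem.List.slice ls (some (s : Int))
                (some ((pv_findEndA ls s : Nat) : Int)) = pv_specFun ls := ih
            simp only [Option.map_some]
            rw [← ih', PySem.List.slice_natCast, PySem.List.slice_natCast]
            have hsb := pv_findStartA_bounds ls 0 s hs
            have h2 := pv_endA_takeWhile (l :: ls) (s + 1)
              (by simp only [List.length_cons]; omega)
            have h4 := pv_endA_takeWhile ls s (by omega)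
            rw [List.drop_succ_cons] at h2
            simp only [List.drop_succ_cons]
            rw [h2, h4]

-- ===== VERDICT (by name: the statement is the Claim_ definition above) =====
theorem extract_draw_block_lines_spec : Claim_equal_extract_draw_block_lines := by
  intro page_text _
  unfold Spec_extract_draw_block_lines extract_draw_block_lines extract_draw_block_lines_alt
  rw [pv_B_eq_spec]
  exact pv_A_eq_spec (pv_clean_lines page_text)
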